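-- pv_equiv track=rewrite | github.com/allangustafson/git-python-classwork | ClassesAndNumerology/Numerology.py | __convertAlpha
-- ===== SOURCE A (Python) =====
-- def __convertAlpha(name: str) -> str:
--     """
--     Convert string of letters into numerology numbers
--     Note - No math. This method concatenates.
--     :return:
--     """
--
--     sNewname = ""
--     for c in name:
--         match c:
--             case "A" | "J" | "S":
--                 sNewname += "1"
--             case "B" | "K" | "T":
--                 sNewname += "2"
--             case "C" | "L" | "U":
--                 sNewname += "3"
--             case "D" | "M" | "V":
--                 sNewname += "4"
--             case "E" | "N" | "W":
--                 sNewname += "5"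
--             case "F" | "O" | "X":
--                 sNewname += "6"
--             case "G" | "P" | "Y":
--                 sNewname += "7"
--             case "H" | "Q" | "Z":
--                 sNewname += "8"
--             case "I" | "R":
--                 sNewname += "9"
--     return sNewname
-- ===== SOURCE B (Python) =====
-- def __convertAlpha(name: str) -> str:
--     """
--     Convert string of letters into numerology numbers (concatenated).
--     Same value as the 26-case match table: uppercase A-Z maps to
--     (ord(c) - ord('A')) % 9 + 1; every other character is dropped.
--     """
--     return "".join(str((ord(c) - ord("A")) % 9 + 1) for c in name if "A" <= c <= "Z")
-- ===== Notes on version B (the rewrite author's own statement) =====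
-- stated objective: idiomatic
-- what changed: Replaces the 26-case match table and string-accumulator loop with a single join over a generator that keeps uppercase ASCII letters and computes each digit arithmetically from the character code modulo 9.
import Mathlib
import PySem

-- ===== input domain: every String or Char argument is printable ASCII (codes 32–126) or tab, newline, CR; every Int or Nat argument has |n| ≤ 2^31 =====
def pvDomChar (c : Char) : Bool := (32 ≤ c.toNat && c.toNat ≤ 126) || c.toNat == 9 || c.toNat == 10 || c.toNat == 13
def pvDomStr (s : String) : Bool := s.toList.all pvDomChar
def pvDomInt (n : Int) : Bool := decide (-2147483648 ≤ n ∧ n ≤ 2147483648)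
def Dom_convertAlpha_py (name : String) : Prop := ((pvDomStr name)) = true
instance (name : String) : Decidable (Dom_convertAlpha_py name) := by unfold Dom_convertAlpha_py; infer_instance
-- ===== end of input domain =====

-- B replaces A's 26-case match table with a join over a generator keeping 'A'..'Z'
-- and computing the digit by the closed form (ord(c)-65) % 9 + 1 (idiomatic, same cost).


-- ===== PORT A =====
-- one iteration of A's match statement: the characters appended for c (strings as lists of chars)
def convertAlphaStep (c : Char) : List Char :=
  if c = 'A' ∨ c = 'J' ∨ c = 'S' then ['1']
  else if c = 'B' ∨ c = 'K' ∨ c = 'T' then ['2']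
  else if c = 'C' ∨ c = 'L' ∨ c = 'U' then ['3']
  else if c = 'D' ∨ c = 'M' ∨ c = 'V' then ['4']
  else if c = 'E' ∨ c = 'N' ∨ c = 'W' then ['5']
  else if c = 'F' ∨ c = 'O' ∨ c = 'X' then ['6']
  else if c = 'G' ∨ c = 'P' ∨ c = 'Y' then ['7']
  else if c = 'H' ∨ c = 'Q' ∨ c = 'Z' then ['8']
  else if c = 'I' ∨ c = 'R' then ['9']
  else []

def convertAlpha_py (name : String) : String :=
  String.mk (name.toList.foldl (fun acc c => acc ++ convertAlphaStep c) [])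

-- ===== PORT B =====
-- str((ord(c)-ord('A')) % 9 + 1) is the single digit character of code 48 + ((toNat-65) % 9 + 1)
def convertAlphaDigit (c : Char) : Char := Char.ofNat (48 + ((c.toNat - 65) % 9 + 1))

def convertAlpha_py_alt (name : String) : String :=
  String.mk (((name.toList.filter fun c => decide ('A' ≤ c) && decide (c ≤ 'Z')).map convertAlphaDigit))

-- ===== PRECONDITION & SPEC =====
def Spec_convertAlpha_py (name : String) (out : String) : Prop := out = convertAlpha_py_alt name
instance (name : String) (out : String) : Decidable (Spec_convertAlpha_py name out) := by unfold Spec_convertAlpha_py; infer_instance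

-- ===== CLAIM (what is proved, stated in full; the proofs are below) =====
def Claim_equal_convertAlpha_py : Prop := ∀ (name : String), Dom_convertAlpha_py name → Spec_convertAlpha_py name (convertAlpha_py name)

-- ===== LEMMAS AND PROOFS =====
theorem char_eq_of_toNat_eq {c : Char} {n : Nat} (hn : n < 55296) (h : c.toNat = n) :
    c = Char.ofNat n := by
  have hvalid : n.isValidChar := Or.inl (by omega)
  have hv : c.val.toNat = (Char.ofNat n).val.toNat := by
    have h2 : (Char.ofNat n).toNat = n := by rw [Char.toNat_ofNat, if_pos hvalid]
    exact h.trans h2.symm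
  exact Char.ext (UInt32.toNat_inj.mp hv)

theorem char_le_iff (c d : Char) : (c ≤ d) ↔ c.toNat ≤ d.toNat := by
  rw [Char.le_def, UInt32.le_iff_toNat_le]; rfl

-- per-character agreement of the two bodies
theorem step_eq (c : Char) :
    convertAlphaStep c =
      if (decide ('A' ≤ c) && decide (c ≤ 'Z')) = true then [convertAlphaDigit c] else [] := by
  by_cases h : 65 ≤ c.toNat ∧ c.toNat ≤ 90
  · have hc : c = Char.ofNat c.toNat :=
      char_eq_of_toNat_eq (by omega) rfl
    have hrange : (decide ('A' ≤ c) && decide (c ≤ 'Z')) = true := by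
      simp [char_le_iff]; exact ⟨h.1, h.2⟩
    rw [hrange]
    obtain ⟨h1, h2⟩ := h
    interval_cases hn : c.toNat <;>
      (rw [char_eq_of_toNat_eq (by omega) hn]; decide)
  · have h1 : ¬ ('A' ≤ c ∧ c ≤ 'Z') := by
      rw [char_le_iff, char_le_iff]; exact h
    have hrange : (decide ('A' ≤ c) && decide (c ≤ 'Z')) = true ↔ False := by
      simpa using h1
    have hne : ∀ n : Nat, n < 55296 → 65 ≤ n → n ≤ 90 → c ≠ Char.ofNat n := by
      intro n hlt hl hu hceq
      apply h
      have hvalid : n.isValidChar := Or.inl (by omega)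
      have h2 : (Char.ofNat n).toNat = n := by rw [Char.toNat_ofNat, if_pos hvalid]
      constructor <;> (rw [hceq, h2]) <;> first | exact hl | exact hu
    simp only [hrange, if_false]
    unfold convertAlphaStep
    have ne : ∀ s : Char, 65 ≤ s.toNat → s.toNat ≤ 90 → c ≠ s := by
      intro s hl hu hceq
      exact hne s.toNat (by omega) hl hu (by rw [hceq]; exact char_eq_of_toNat_eq (by omega) rfl)
    simp [ne 'A' (by decide) (by decide), ne 'B' (by decide) (by decide),
      ne 'C' (by decide) (by decide), ne 'D' (by decide) (by decide),
      ne 'E' (by decide) (by decide), ne 'F' (by decide) (by decide),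
      ne 'G' (by decide) (by decide), ne 'H' (by decide) (by decide),
      ne 'I' (by decide) (by decide), ne 'J' (by decide) (by decide),
      ne 'K' (by decide) (by decide), ne 'L' (by decide) (by decide),
      ne 'M' (by decide) (by decide), ne 'N' (by decide) (by decide),
      ne 'O' (by decide) (by decide), ne 'P' (by decide) (by decide),
      ne 'Q' (by decide) (by decide), ne 'R' (by decide) (by decide),
      ne 'S' (by decide) (by decide), ne 'T' (by decide) (by decide),
      ne 'U' (by decide) (by decide), ne 'V' (by decide) (by decide),
      ne 'W' (by decide) (by decide), ne 'X' (by decide) (by decide),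
      ne 'Y' (by decide) (by decide), ne 'Z' (by decide) (by decide)]

theorem foldl_step (cs : List Char) (acc : List Char) :
    cs.foldl (fun acc c => acc ++ convertAlphaStep c) acc =
      acc ++ (cs.filter fun c => decide ('A' ≤ c) && decide (c ≤ 'Z')).map convertAlphaDigit := by
  induction cs generalizing acc with
  | nil => simp
  | cons c cs ih =>
    rw [List.foldl_cons, ih, List.filter_cons, step_eq c]
    by_cases h : (decide ('A' ≤ c) && decide (c ≤ 'Z')) = true <;> simp [h]

-- ===== VERDICT (by name: the statement is the Claim_ definition above) =====
theorem convertAlpha_py_spec : Claim_equal_convertAlpha_py := by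
  intro name _
  unfold Spec_convertAlpha_py convertAlpha_py convertAlpha_py_alt
  rw [foldl_step]
  rfl
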